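-- pv_equiv track=rewrite | github.com/CrashXBETAX/My_first_robot | Code/my_robot_without_emoji.py | matriz_borda
-- ===== SOURCE A (Python) =====
-- def matriz_borda(nlinhas: int, ncolunas: int) -> list:
--   M = []
--   for i in range(nlinhas):
--     linha = []
--     for j in range(ncolunas):
--       if i==0 or j==0 or i==nlinhas-1 or j==ncolunas-1: # borda
--         linha.append("X")
--       else:
--         linha.append(" ")
--     M.append(linha)
--   return M
-- ===== SOURCE B (Python) =====
-- def matriz_borda(nlinhas: int, ncolunas: int) -> list:
--   if nlinhas <= 0:
--     return []
--   border = ["X"] * ncolunas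
--   if ncolunas >= 2:
--     interior = ["X"] + [" "] * (ncolunas - 2) + ["X"]
--   else:
--     interior = border
--   return [list(border) if i == 0 or i == nlinhas - 1 else list(interior)
--           for i in range(nlinhas)]
-- ===== Notes on version B (the rewrite author's own statement) =====
-- stated objective: simpler
-- what changed: Replaces the per-cell boundary test inside nested loops by two precomputed row templates (border row and interior row) and a per-row classification.
import Mathlib
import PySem

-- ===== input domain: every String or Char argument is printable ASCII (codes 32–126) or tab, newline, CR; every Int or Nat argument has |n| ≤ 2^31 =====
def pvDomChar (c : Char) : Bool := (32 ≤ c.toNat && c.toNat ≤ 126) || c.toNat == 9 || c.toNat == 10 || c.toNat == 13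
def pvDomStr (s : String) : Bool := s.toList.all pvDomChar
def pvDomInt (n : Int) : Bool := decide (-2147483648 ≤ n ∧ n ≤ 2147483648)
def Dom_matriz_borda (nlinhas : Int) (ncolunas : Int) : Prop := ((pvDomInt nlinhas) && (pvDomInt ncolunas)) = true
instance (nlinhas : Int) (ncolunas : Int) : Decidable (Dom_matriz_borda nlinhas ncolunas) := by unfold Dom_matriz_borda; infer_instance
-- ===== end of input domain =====

-- B builds the matrix from two precomputed row templates (border / interior) instead of A's per-cell boundary test.

-- ===== PORT A =====
def matriz_borda (nlinhas : Int) (ncolunas : Int) : List (List String) :=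
  (PySem.List.pyRange 0 nlinhas 1).foldl
    (fun M i =>
      let linha := (PySem.List.pyRange 0 ncolunas 1).foldl
        (fun linha j =>
          if i = 0 ∨ j = 0 ∨ i = nlinhas - 1 ∨ j = ncolunas - 1 then
            linha ++ ["X"]
          else
            linha ++ [" "])
        []
      M ++ [linha])
    []

-- ===== PORT B =====
def pvBorderRow (ncolunas : Int) : List String := List.replicate ncolunas.toNat "X"

def pvInteriorRow (ncolunas : Int) : List String :=
  if 2 ≤ ncolunas then ["X"] ++ List.replicate (ncolunas - 2).toNat " " ++ ["X"]
  else pvBorderRow ncolunas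

def matriz_borda_alt (nlinhas : Int) (ncolunas : Int) : List (List String) :=
  if nlinhas ≤ 0 then []
  else (PySem.List.pyRange 0 nlinhas 1).map
    (fun i => if i = 0 ∨ i = nlinhas - 1 then pvBorderRow ncolunas else pvInteriorRow ncolunas)

-- ===== PRECONDITION & SPEC =====
def Spec_matriz_borda (nlinhas : Int) (ncolunas : Int) (out : List (List String)) : Prop := out = matriz_borda_alt nlinhas ncolunas
instance (nlinhas : Int) (ncolunas : Int) (out : List (List String)) : Decidable (Spec_matriz_borda nlinhas ncolunas out) := by unfold Spec_matriz_borda; infer_instance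

-- ===== CLAIM (what is proved, stated in full; the proofs are below) =====
def Claim_equal_matriz_borda : Prop := ∀ (nlinhas : Int) (ncolunas : Int), Dom_matriz_borda nlinhas ncolunas → Spec_matriz_borda nlinhas ncolunas (matriz_borda nlinhas ncolunas)

-- ===== LEMMAS AND PROOFS =====

-- A's inner loop result, written as a map over the column range, equals B's template for i's row class.
theorem pv_row_eq' (nlinhas ncolunas i : Int) :
    (PySem.List.pyRange 0 ncolunas 1).map
      (fun j => if i = 0 ∨ j = 0 ∨ i = nlinhas - 1 ∨ j = ncolunas - 1 then "X" else " ")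
      = (if i = 0 ∨ i = nlinhas - 1 then pvBorderRow ncolunas else pvInteriorRow ncolunas) := by
  by_cases hb : i = 0 ∨ i = nlinhas - 1
  · rw [if_pos hb]
    have hall : ∀ j ∈ PySem.List.pyRange 0 ncolunas 1,
        (if i = 0 ∨ j = 0 ∨ i = nlinhas - 1 ∨ j = ncolunas - 1 then "X" else " ") = "X" := by
      intro j _
      rcases hb with h | h <;> simp [h]
    rw [List.map_congr_left hall]
    simp [pvBorderRow, List.map_const', PySem.List.length_pyRange_one]
  · rw [if_neg hb]
    have h0 : i ≠ 0 := fun h => hb (Or.inl h)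
    have h1 : i ≠ nlinhas - 1 := fun h => hb (Or.inr h)
    by_cases hc : 2 ≤ ncolunas
    · rw [PySem.List.pyRange_one_append 0 1 ncolunas (by norm_num) (by omega),
          PySem.List.pyRange_one_append 1 (ncolunas - 1) ncolunas (by omega) (by omega)]
      have hfirst : PySem.List.pyRange 0 1 1 = [0] := by decide
      have hlast : PySem.List.pyRange (ncolunas - 1) ncolunas 1 = [ncolunas - 1] := by
        rw [PySem.List.pyRange_one]
        have : (ncolunas - (ncolunas - 1)).toNat = 1 := by omega
        rw [this]
        simp
      rw [hfirst, hlast]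
      simp only [List.map_append, List.map_cons, List.map_nil]
      have hmid : ∀ j ∈ PySem.List.pyRange 1 (ncolunas - 1) 1,
          (if i = 0 ∨ j = 0 ∨ i = nlinhas - 1 ∨ j = ncolunas - 1 then "X" else " ") = " " := by
        intro j hj
        rw [PySem.List.mem_pyRange_one] at hj
        rw [if_neg (by simp only [not_or]; exact ⟨h0, by omega, h1, by omega⟩)]
      rw [List.map_congr_left hmid]
      rw [pvInteriorRow, if_pos hc]
      simp [h0, h1, List.map_const', PySem.List.length_pyRange_one]
      omega
    · rw [pvInteriorRow, if_neg hc]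
      by_cases hc1 : ncolunas = 1
      · subst hc1
        have : PySem.List.pyRange 0 1 1 = [0] := by decide
        rw [this]
        simp [pvBorderRow]
      · have hle : ncolunas ≤ 0 := by omega
        rw [PySem.List.pyRange_one_eq_nil (by omega)]
        simp [pvBorderRow]
        omega

theorem matriz_borda_spec : Claim_equal_matriz_borda := by
  intro nlinhas ncolunas _
  unfold Spec_matriz_borda matriz_borda matriz_borda_alt
  dsimp only
  have hout :
      List.foldl
        (fun (M : List (List String)) (i : Int) =>
          M ++
            [List.foldl
                (fun (linha : List String) (j : Int) =>
                  if i = 0 ∨ j = 0 ∨ i = nlinhas - 1 ∨ j = ncolunas - 1 then linha ++ ["X"]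
                  else linha ++ [" "])
                [] (PySem.List.pyRange 0 ncolunas 1)])
        [] (PySem.List.pyRange 0 nlinhas 1)
      = List.foldl
          (fun (M : List (List String)) (i : Int) =>
            M ++ [if i = 0 ∨ i = nlinhas - 1 then pvBorderRow ncolunas else pvInteriorRow ncolunas])
          [] (PySem.List.pyRange 0 nlinhas 1) := by
    apply PySem.List.foldl_congr_mem
    intro M i _
    have hfun : (fun (linha : List String) (j : Int) =>
        if i = 0 ∨ j = 0 ∨ i = nlinhas - 1 ∨ j = ncolunas - 1 then linha ++ ["X"]
        else linha ++ [" "])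
        = (fun (linha : List String) (j : Int) =>
            linha ++ [if i = 0 ∨ j = 0 ∨ i = nlinhas - 1 ∨ j = ncolunas - 1 then "X" else " "]) := by
      funext l j
      split <;> rfl
    rw [hfun, PySem.List.foldl_append_singleton_eq_map, List.nil_append,
      pv_row_eq' nlinhas ncolunas i]
  rw [hout, PySem.List.foldl_append_singleton_eq_map, List.nil_append]
  by_cases hn : nlinhas ≤ 0
  · rw [if_pos hn, PySem.List.pyRange_one_eq_nil hn, List.map_nil]
  · rw [if_neg hn]
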